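-- pv_equiv track=rewrite | github.com/eugene-komar-bmll/aoc23 | 02/2.py | fewest
-- ===== SOURCE A (Python) =====
-- def fewest(game):  # list of maps
--     res = {}
--     for subgame in game:
--         for color, n in subgame.items():
--             if color in res.keys():
--                 if res[color] < n:
--                     res[color] = n
--             else:
--                 res[color] = n
--
--     return res
-- ===== SOURCE B (Python) =====
-- def fewest(game):  # list of maps
--     # collect every count seen per color (first-appearance order), then reduce with max
--     groups = {}
--     for subgame in game:
--         for color, n in subgame.items():
--             groups.setdefault(color, []).append(n)
--     return {color: max(vals) for color, vals in groups.items()}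
-- ===== Notes on version B (the rewrite author's own statement) =====
-- stated objective: alternative
-- what changed: Replaces the fused in-loop running-max update with a collect-then-reduce structure: a first pass groups all counts per color into lists, and a separate dict comprehension takes max of each list.
import Mathlib
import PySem

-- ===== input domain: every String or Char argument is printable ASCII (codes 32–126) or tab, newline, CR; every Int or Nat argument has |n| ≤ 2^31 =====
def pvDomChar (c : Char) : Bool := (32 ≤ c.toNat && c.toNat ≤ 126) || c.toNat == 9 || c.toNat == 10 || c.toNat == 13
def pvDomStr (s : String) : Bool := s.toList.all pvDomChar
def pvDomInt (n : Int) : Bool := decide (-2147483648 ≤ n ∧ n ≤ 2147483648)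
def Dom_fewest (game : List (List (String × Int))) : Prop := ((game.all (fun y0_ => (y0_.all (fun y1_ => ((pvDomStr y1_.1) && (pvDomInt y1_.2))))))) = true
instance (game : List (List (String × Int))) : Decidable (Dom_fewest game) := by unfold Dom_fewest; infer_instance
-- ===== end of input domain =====

-- B replaces A's fused running-max update with a two-phase collect-all-then-reduce structure (alternative decomposition, not faster).

-- ===== PORT A =====
def fewest (game : List (List (String × Int))) : List (String × Int) :=
  (game.foldl
    (fun res subgame =>
      subgame.foldl
        (fun res p =>
          if res.contains p.1 then
            if res.getD p.1 0 < p.2 then res.insert p.1 p.2 else res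
          else res.insert p.1 p.2)
        res)
    PySem.Dict.empty).items

-- ===== PORT B =====
-- `max(vals)` of Source B; vals is always nonempty there, the 0 default is unreachable
def pyMaxInt (l : List Int) : Int := (PySem.List.max? l (fun v => v)).getD 0

def fewest_alt (game : List (List (String × Int))) : List (String × Int) :=
  (game.foldl
    (fun groups subgame =>
      subgame.foldl (fun groups p => groups.modify p.1 [] (· ++ [p.2])) groups)
    PySem.Dict.empty).items.map (fun p => (p.1, pyMaxInt p.2))

-- ===== PRECONDITION & SPEC =====
def Spec_fewest (game : List (List (String × Int))) (out : List (String × Int)) : Prop := out = fewest_alt game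
instance (game : List (List (String × Int))) (out : List (String × Int)) : Decidable (Spec_fewest game out) := by unfold Spec_fewest; infer_instance

-- ===== CLAIM (what is proved, stated in full; the proofs are below) =====
def Claim_equal_fewest : Prop := ∀ (game : List (List (String × Int))), Dom_fewest game → Spec_fewest game (fewest game)

-- ===== LEMMAS AND PROOFS =====

-- A's loop body, one (color, count) pair at a time
def aStep (res : PySem.Dict String Int) (p : String × Int) : PySem.Dict String Int :=
  if res.contains p.1 then
    if res.getD p.1 0 < p.2 then res.insert p.1 p.2 else res
  else res.insert p.1 p.2

-- B's grouping loop body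
def bStep (g : PySem.Dict String (List Int)) (p : String × Int) : PySem.Dict String (List Int) :=
  g.modify p.1 [] (· ++ [p.2])

-- B's second phase on a raw items list
def fin (m : List (String × List Int)) : List (String × Int) :=
  m.map (fun p => (p.1, pyMaxInt p.2))

theorem fewest_eq_flatten (game : List (List (String × Int))) :
    fewest game = ((game.flatten).foldl aStep PySem.Dict.empty).items := by
  rw [List.foldl_flatten]; rfl

theorem fewest_alt_eq_flatten (game : List (List (String × Int))) :
    fewest_alt game = fin ((game.flatten).foldl bStep PySem.Dict.empty).items := by
  rw [List.foldl_flatten]; rfl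

theorem contains_fin (m : List (String × List Int)) (c : String) :
    (PySem.Dict.mk (fin m)).contains c = (PySem.Dict.mk m).contains c := by
  simp only [PySem.Dict.contains, fin, List.any_map]
  rfl

theorem get?_fin (m : List (String × List Int)) (c : String) :
    (PySem.Dict.mk (fin m)).get? c = ((PySem.Dict.mk m).get? c).map pyMaxInt := by
  simp only [PySem.Dict.get?, fin, List.find?_map, Option.map_map]
  rfl

theorem pyMax_cons (x : Int) (t : List Int) : pyMaxInt (x :: t) = t.foldl max x := by
  simp [pyMaxInt, PySem.List.max?_id_cons]

theorem pyMax_append (l : List Int) (n : Int) (h : l ≠ []) :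
    pyMaxInt (l ++ [n]) = if pyMaxInt l < n then n else pyMaxInt l := by
  cases l with
  | nil => exact absurd rfl h
  | cons x t =>
    rw [List.cons_append, pyMax_cons, pyMax_cons, List.foldl_append]
    simp only [List.foldl_cons, List.foldl_nil]
    rcases lt_or_ge (t.foldl max x) n with hlt | hge
    · rw [if_pos hlt, max_eq_right hlt.le]
    · rw [if_neg (not_lt.mpr hge), max_eq_left hge]

theorem map_replace_not_mem {ν : Type} (m : List (String × ν)) (c : String) (v : ν)
    (h : ∀ q ∈ m, q.1 ≠ c) :
    m.map (fun q => if q.1 == c then (c, v) else q) = m := by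
  induction m with
  | nil => rfl
  | cons q m ih =>
    have hq : (q.1 == c) = false := beq_eq_false_iff_ne.mpr (h q (List.mem_cons_self ..))
    simp only [List.map_cons, hq, Bool.false_eq_true, if_false]
    rw [ih (fun q hq => h q (List.mem_cons_of_mem _ hq))]

theorem map_replace_id {ν : Type} (m : List (String × ν)) (c : String) (v : ν)
    (hnd : (m.map Prod.fst).Nodup) (hmem : (c, v) ∈ m) :
    m.map (fun q => if q.1 == c then (c, v) else q) = m := by
  induction m with
  | nil => simp at hmem
  | cons q m ih =>
    simp only [List.map_cons, List.nodup_cons] at hnd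
    rcases List.mem_cons.mp hmem with h | h
    · subst h
      simp only [List.map_cons, beq_self_eq_true, ite_self]
      rw [map_replace_not_mem m c v (by
        intro q' hq' hc
        exact hnd.1 (by simpa [hc] using List.mem_map_of_mem (f := Prod.fst) hq'))]
    · have hq : (q.1 == c) = false := beq_eq_false_iff_ne.mpr (by
        intro hc
        have : c ∈ m.map Prod.fst := by
          simpa using List.mem_map_of_mem (f := Prod.fst) h
        rw [hc] at hnd; exact hnd.1 this)
      simp only [List.map_cons, hq, Bool.false_eq_true, if_false]
      rw [ih hnd.2 h]

theorem step_comm (g : PySem.Dict String (List Int)) (p : String × Int)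
    (hnd : g.keys.Nodup) (hne : ∀ q ∈ g.items, q.2 ≠ []) :
    aStep (PySem.Dict.mk (fin g.items)) p = PySem.Dict.mk (fin (bStep g p).items) := by
  obtain ⟨c, n⟩ := p
  have hcont : (PySem.Dict.mk (fin g.items)).contains c = g.contains c := contains_fin g.items c
  by_cases hc : g.contains c = true
  · -- color already present: B appends n to its list, A takes the max
    obtain ⟨l, hl⟩ : ∃ l, g.get? c = some l := by
      have := PySem.Dict.contains_eq_isSome_get? (d := g) (k := c)
      rw [hc] at this
      exact Option.isSome_iff_exists.mp this.symm
    have hlm : (c, l) ∈ g.items := PySem.Dict.mem_items_of_get?_eq_some g hl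
    have hlne : l ≠ [] := hne _ hlm
    have hgetD : g.getD c [] = l := PySem.Dict.getD_of_get?_eq_some g [] hl
    have hA_getD : (PySem.Dict.mk (fin g.items)).getD c 0 = pyMaxInt l := by
      simp [PySem.Dict.getD, get?_fin, hl]
    have hbitems : (bStep g (c, n)).items
        = g.items.map (fun q => if q.1 == c then (c, l ++ [n]) else q) := by
      simp [bStep, PySem.Dict.modify, PySem.Dict.insert, hc, hgetD]
    have hfinb : fin (bStep g (c, n)).items
        = (fin g.items).map (fun q => if q.1 == c then (c, pyMaxInt (l ++ [n])) else q) := by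
      rw [hbitems]
      simp only [fin, List.map_map]
      apply List.map_congr_left
      intro q _
      by_cases hq : q.1 == c <;> simp [hq, Function.comp]
    rw [hfinb, pyMax_append l n hlne]
    unfold aStep
    rw [hcont, if_pos hc, hA_getD]
    by_cases hlt : pyMaxInt l < n
    · -- new count is larger: both replace the entry at c
      rw [if_pos hlt]
      have : (PySem.Dict.mk (fin g.items)).contains c = true := by rw [hcont]; exact hc
      simp [PySem.Dict.insert, this, hlt]
    · -- not larger: A keeps res, B's replacement is the identity
      rw [if_neg hlt, if_neg hlt]
      have hndfin : ((fin g.items).map Prod.fst).Nodup := by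
        have : (fin g.items).map Prod.fst = g.items.map Prod.fst := by
          simp [fin, List.map_map, Function.comp]
        rw [this]; exact hnd
      have hmemfin : (c, pyMaxInt l) ∈ fin g.items := by
        simpa [fin] using List.mem_map_of_mem (f := fun p => (p.1, pyMaxInt p.2)) hlm
      rw [map_replace_id _ _ _ hndfin hmemfin]
  · -- fresh color: both append a new entry
    have hc' : g.contains c = false := by simpa using hc
    have hgetD : g.getD c [] = [] := PySem.Dict.getD_of_not_contains g [] hc'
    have hbitems : (bStep g (c, n)).items = g.items ++ [(c, [n])] := by
      simp [bStep, PySem.Dict.modify, PySem.Dict.insert, hc', hgetD]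
    have hn1 : pyMaxInt [n] = n := rfl
    unfold aStep
    rw [hcont, if_neg hc]
    have hthis : (PySem.Dict.mk (fin g.items)).contains c = false := by rw [hcont]; exact hc'
    have hins : (PySem.Dict.mk (fin g.items)).insert c n
        = PySem.Dict.mk (fin g.items ++ [(c, n)]) := by
      simp [PySem.Dict.insert, hthis]
    rw [hins, hbitems]
    simp [fin, hn1]

theorem bStep_preserves (g : PySem.Dict String (List Int)) (p : String × Int)
    (hnd : g.keys.Nodup) (hne : ∀ q ∈ g.items, q.2 ≠ []) :
    (bStep g p).keys.Nodup ∧ ∀ q ∈ (bStep g p).items, q.2 ≠ [] := by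
  obtain ⟨c, n⟩ := p
  by_cases hc : g.contains c = true
  · have hitems : (bStep g (c, n)).items
        = g.items.map (fun q => if q.1 == c then (c, g.getD c [] ++ [n]) else q) := by
      simp [bStep, PySem.Dict.modify, PySem.Dict.insert, hc]
    constructor
    · have : (bStep g (c, n)).keys = g.keys := by
        simp only [PySem.Dict.keys, hitems, List.map_map]
        apply List.map_congr_left
        intro q _
        by_cases hq : q.1 == c
        · simp [hq, Function.comp]; exact (eq_of_beq hq).symm
        · simp [hq, Function.comp]
      rw [this]; exact hnd
    · intro q hq
      rw [hitems] at hq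
      obtain ⟨q', hq', hq'eq⟩ := List.mem_map.mp hq
      by_cases h : q'.1 == c
      · rw [if_pos h] at hq'eq; rw [← hq'eq]; simp
      · rw [if_neg h] at hq'eq; rw [← hq'eq]; exact hne _ hq'
  · have hc' : g.contains c = false := by simpa using hc
    have hitems : (bStep g (c, n)).items = g.items ++ [(c, g.getD c [] ++ [n])] := by
      simp [bStep, PySem.Dict.modify, PySem.Dict.insert, hc']
    constructor
    · have : (bStep g (c, n)).keys = g.keys ++ [c] := by
        simp [PySem.Dict.keys, hitems]
      rw [this]
      refine List.Nodup.append hnd (List.nodup_singleton c) ?_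
      intro x hx hx'
      simp at hx'
      subst hx'
      have : g.contains x = true := by
        simp only [PySem.Dict.contains, List.any_eq_true]
        simp only [PySem.Dict.keys, List.mem_map] at hx
        obtain ⟨q, hq, hq1⟩ := hx
        exact ⟨q, hq, by simp [hq1]⟩
      rw [this] at hc'; exact absurd hc' (by simp)
    · intro q hq
      rw [hitems] at hq
      rcases List.mem_append.mp hq with h | h
      · exact hne _ h
      · simp only [List.mem_singleton] at h; rw [h]; simp

theorem fold_comm (ps : List (String × Int)) (g : PySem.Dict String (List Int))
    (hnd : g.keys.Nodup) (hne : ∀ q ∈ g.items, q.2 ≠ []) :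
    ps.foldl aStep (PySem.Dict.mk (fin g.items))
      = PySem.Dict.mk (fin (ps.foldl bStep g).items) := by
  induction ps generalizing g with
  | nil => rfl
  | cons p ps ih =>
    simp only [List.foldl_cons]
    rw [step_comm g p hnd hne]
    obtain ⟨hnd', hne'⟩ := bStep_preserves g p hnd hne
    exact ih (bStep g p) hnd' hne'

-- ===== VERDICT (by name: the statement is the Claim_ definition above) =====
theorem fewest_spec : Claim_equal_fewest := by
  intro game _
  unfold Spec_fewest
  rw [fewest_eq_flatten, fewest_alt_eq_flatten]
  have h := fold_comm game.flatten PySem.Dict.empty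
    (by simp [PySem.Dict.empty, PySem.Dict.keys]) (by simp [PySem.Dict.empty])
  have hempty : PySem.Dict.mk (fin (PySem.Dict.empty (κ := String) (ν := List Int)).items)
      = (PySem.Dict.empty : PySem.Dict String Int) := rfl
  rw [hempty] at h
  rw [h]
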